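-- pv_equiv track=rewrite | github.com/crmarsh/advent_of_code | 2015/day11/code.py | check_seqential_at_least
-- ===== SOURCE A (Python) =====
-- def check_seqential_at_least(coded, at_least):
--     """sequential run length"""
--     i = 0
--     sequential = 1
--     n = len(coded) - 1
--     while i < n:
--         if (coded[i] + 1) == (coded[i + 1]):
--             sequential += 1
--             if sequential >= at_least:
--                 return True
--         else:
--             sequential = 1
--         i += 1
--     return False
-- ===== SOURCE B (Python) =====
-- def check_seqential_at_least(coded, at_least):
--     """sequential run length"""
--     m = len(coded) - 1
--     breaks = [-1] + [i for i in range(m) if coded[i] + 1 != coded[i + 1]] + [m]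
--     longest = max(b - a - 1 for a, b in zip(breaks, breaks[1:]))
--     return longest >= max(at_least - 1, 1)
-- ===== Notes on version B (the rewrite author's own statement) =====
-- stated objective: alternative
-- what changed: A scans once with a live run counter reset to 1 and an early return; B instead builds the list of break positions (indices where the pair is not an increment, with -1 and len-1 sentinels) and takes the maximum gap between adjacent breaks, comparing it once against max(at_least-1,1) (A's effective threshold is max(at_least,2) elements, since it only returns after seeing an actual increment).
import Mathlib
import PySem

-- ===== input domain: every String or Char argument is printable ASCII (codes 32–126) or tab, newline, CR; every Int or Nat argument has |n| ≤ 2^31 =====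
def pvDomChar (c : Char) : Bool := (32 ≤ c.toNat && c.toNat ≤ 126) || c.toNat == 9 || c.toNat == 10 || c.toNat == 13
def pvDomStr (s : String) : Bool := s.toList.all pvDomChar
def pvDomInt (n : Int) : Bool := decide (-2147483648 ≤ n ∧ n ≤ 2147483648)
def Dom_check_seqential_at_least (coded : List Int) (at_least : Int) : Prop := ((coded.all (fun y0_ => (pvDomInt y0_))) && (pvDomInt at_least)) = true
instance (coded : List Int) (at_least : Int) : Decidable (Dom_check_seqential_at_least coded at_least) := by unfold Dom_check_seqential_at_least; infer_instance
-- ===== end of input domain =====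

-- B replaces A's live-counter scan with a staged computation: it first collects the
-- break positions (indices whose adjacent pair is not an increment, between sentinels
-- -1 and len-1) and then compares the maximum gap between adjacent breaks once at the end
-- (alternative decomposition; same asymptotic cost).

-- ===== PORT A =====
-- while loop ported as fuel recursion over the same state (i, sequential); fuel = coded.length
-- always suffices since the loop runs at most len-1 steps. coded[i] / coded[i+1] are in range
-- whenever i < n = len - 1, so pyGetD is exact here.
def check_seqential_at_least_go (coded : List Int) (n at_least : Int) (fuel : Nat)
    (i sequential : Int) : Bool :=
  match fuel with
  | 0 => false
  | fuel + 1 =>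
    if i < n then
      if PySem.List.pyGetD coded i 0 + 1 == PySem.List.pyGetD coded (i + 1) 0 then
        if sequential + 1 ≥ at_least then true
        else check_seqential_at_least_go coded n at_least fuel (i + 1) (sequential + 1)
      else check_seqential_at_least_go coded n at_least fuel (i + 1) 1
    else false

def check_seqential_at_least (coded : List Int) (at_least : Int) : Bool :=
  check_seqential_at_least_go coded ((coded.length : Int) - 1) at_least coded.length 0 1

-- ===== PORT B =====
-- Source B: break positions between sentinels -1 and m, then max gap between adjacent breaks.
-- Python's max runs on a provably nonempty generator (breaks has ≥ 2 elements); every gap is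
-- ≥ -1, so folding max from the unreachable base -2 is exact there.
def check_seqential_at_least_alt (coded : List Int) (at_least : Int) : Bool :=
  let m : Int := (coded.length : Int) - 1
  let breaks : List Int :=
    -1 :: ((PySem.List.pyRange 0 m 1).filter
      (fun i => !(PySem.List.pyGetD coded i 0 + 1 == PySem.List.pyGetD coded (i + 1) 0)) ++ [m])
  let longest := ((breaks.zip (breaks.drop 1)).map (fun ab => ab.2 - ab.1 - 1)).foldl max (-2)
  decide (longest ≥ max (at_least - 1) 1)

-- ===== PRECONDITION & SPEC =====
def Spec_check_seqential_at_least (coded : List Int) (at_least : Int) (out : Bool) : Prop := out = check_seqential_at_least_alt coded at_least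
instance (coded : List Int) (at_least : Int) (out : Bool) : Decidable (Spec_check_seqential_at_least coded at_least out) := by unfold Spec_check_seqential_at_least; infer_instance

-- ===== CLAIM (what is proved, stated in full; the proofs are below) =====
def Claim_equal_check_seqential_at_least : Prop := ∀ (coded : List Int) (at_least : Int), Dom_check_seqential_at_least coded at_least → Spec_check_seqential_at_least coded at_least (check_seqential_at_least coded at_least)

-- ===== LEMMAS AND PROOFS =====

-- the adjacent-pair test at index i, shared vocabulary of both proofs
def pvPred (coded : List Int) (i : Int) : Bool :=
  PySem.List.pyGetD coded i 0 + 1 == PySem.List.pyGetD coded (i + 1) 0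

-- A's loop restated structurally over the boolean pair-sequence it inspects
def pvBoolLoop (at_least : Int) : List Bool → Int → Bool
  | [], _ => false
  | b :: t, seq =>
    if b then (if seq + 1 ≥ at_least then true else pvBoolLoop at_least t (seq + 1))
    else pvBoolLoop at_least t 1

-- (best run so far, current run) accumulator
def pvStep (bc : Int × Int) (b : Bool) : Int × Int :=
  let cur := if b then bc.2 + 1 else 0
  (max bc.1 cur, cur)

-- positions of false entries, indexed from k
def pvFalseIdx : List Bool → Int → List Int
  | [], _ => []
  | b :: t, k => if b then pvFalseIdx t (k + 1) else k :: pvFalseIdx t (k + 1)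

-- gaps between adjacent positions (prev then the list)
def pvGaps (prev : Int) : List Int → List Int
  | [] => []
  | x :: t => (x - prev - 1) :: pvGaps x t

theorem pvGo_eq_boolLoop (coded : List Int) (at_least : Int) : ∀ (fuel : Nat) (i seq : Int),
    ((coded.length : Int) - 1 - i).toNat ≤ fuel →
    check_seqential_at_least_go coded ((coded.length : Int) - 1) at_least fuel i seq
      = pvBoolLoop at_least ((PySem.List.pyRange i ((coded.length : Int) - 1) 1).map (pvPred coded)) seq := by
  intro fuel
  induction fuel with
  | zero =>
    intro i seq hf
    have hle : (coded.length : Int) - 1 ≤ i := by omega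
    rw [check_seqential_at_least_go, PySem.List.pyRange_one_eq_nil hle]
    rfl
  | succ fuel ih =>
    intro i seq hf
    rw [check_seqential_at_least_go]
    by_cases hlt : i < (coded.length : Int) - 1
    · rw [PySem.List.pyRange_one_cons hlt, List.map_cons]
      rw [if_pos hlt]
      have hpred : (PySem.List.pyGetD coded i 0 + 1 == PySem.List.pyGetD coded (i + 1) 0)
          = pvPred coded i := rfl
      rw [hpred, pvBoolLoop]
      cases hb : pvPred coded i with
      | true =>
        simp only [if_true]
        by_cases hth : seq + 1 ≥ at_least
        · rw [if_pos hth, if_pos hth]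
        · rw [if_neg hth, if_neg hth, ih (i + 1) (seq + 1) (by omega)]
      | false =>
        simp only [Bool.false_eq_true, if_false]
        rw [ih (i + 1) 1 (by omega)]
    · rw [if_neg hlt, PySem.List.pyRange_one_eq_nil (by omega)]
      rfl

theorem pvFoldBest_mono (bs : List Bool) : ∀ best cur : Int,
    best ≤ (bs.foldl pvStep (best, cur)).1 := by
  induction bs with
  | nil => intro best cur; simp
  | cons b t ih =>
    intro best cur
    simp only [List.foldl_cons]
    exact le_trans (le_max_left _ _) (ih _ _)

theorem pvBoolLoop_eq_fold (at_least : Int) (bs : List Bool) : ∀ best cur : Int,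
    0 ≤ cur → best < max (at_least - 1) 1 →
    pvBoolLoop at_least bs (cur + 1)
      = decide ((bs.foldl pvStep (best, cur)).1 ≥ max (at_least - 1) 1) := by
  induction bs with
  | nil => intro best cur _ hb; simp [pvBoolLoop]; omega
  | cons b t ih =>
    intro best cur hc hb
    rw [pvBoolLoop]
    simp only [List.foldl_cons]
    cases b with
    | true =>
      have hstep : pvStep (best, cur) true = (max best (cur + 1), cur + 1) := by
        simp [pvStep]
      simp only [hstep, if_true]
      by_cases hth : cur + 1 + 1 ≥ at_least
      · rw [if_pos hth]
        have h1 : max (at_least - 1) 1 ≤ cur + 1 := by omega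
        have h2 : max (at_least - 1) 1 ≤ (t.foldl pvStep (max best (cur + 1), cur + 1)).1 :=
          le_trans (le_trans h1 (le_max_right best (cur + 1))) (pvFoldBest_mono _ _ _)
        symm; rw [decide_eq_true_iff]; exact h2
      · rw [if_neg hth, ih (max best (cur + 1)) (cur + 1) (by omega) (by omega)]
    | false =>
      have hstep : pvStep (best, cur) false = (max best 0, 0) := by simp [pvStep]
      simp only [hstep, Bool.false_eq_true, if_false]
      have h := ih (max best 0) 0 le_rfl (by omega)
      rw [zero_add] at h
      exact h

theorem pvFalseIdx_ge (bs : List Bool) : ∀ (k : Int) (j : Int), j ∈ pvFalseIdx bs k → k ≤ j := by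
  induction bs with
  | nil => intro k j h; simp [pvFalseIdx] at h
  | cons b t ih =>
    intro k j h
    cases b with
    | true => simp only [pvFalseIdx, if_true] at h; have := ih (k + 1) j h; omega
    | false =>
      simp only [pvFalseIdx, Bool.false_eq_true, if_false, List.mem_cons] at h
      rcases h with h | h
      · omega
      · have := ih (k + 1) j h; omega

theorem pvFalseIdx_lt (bs : List Bool) : ∀ (k : Int) (j : Int), j ∈ pvFalseIdx bs k →
    j ≤ k + (bs.length : Int) - 1 := by
  induction bs with
  | nil => intro k j h; simp [pvFalseIdx] at h
  | cons b t ih =>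
    intro k j h
    have hlen : ((b :: t).length : Int) = (t.length : Int) + 1 := by simp
    cases b with
    | true => simp only [pvFalseIdx, if_true] at h; have := ih (k + 1) j h; omega
    | false =>
      simp only [pvFalseIdx, Bool.false_eq_true, if_false, List.mem_cons] at h
      rcases h with h | h
      · omega
      · have := ih (k + 1) j h; omega

-- head of the gaps list absorbs a smaller seed
theorem pvFoldMax_absorb (rest : List Int) (b c g : Int) (h : c ≤ g) :
    List.foldl max b (g :: rest) = List.foldl max (max b c) (g :: rest) := by
  simp only [List.foldl_cons]
  have : max b g = max (max b c) g := by omega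
  rw [this]

theorem pvFold_eq_gaps (bs : List Bool) : ∀ (k prev best cur : Int),
    cur = k - prev - 1 → 0 ≤ cur → cur ≤ best →
    (bs.foldl pvStep (best, cur)).1
      = (pvGaps prev (pvFalseIdx bs k ++ [k + (bs.length : Int)])).foldl max best := by
  induction bs with
  | nil =>
    intro k prev best cur hcur h0 hcb
    simp only [List.foldl_nil, pvFalseIdx, List.nil_append, pvGaps, List.length_nil]
    simp only [List.foldl_cons, List.foldl_nil]
    omega
  | cons b t ih =>
    intro k prev best cur hcur h0 hcb
    have hlen : (((b :: t).length : Int)) = (t.length : Int) + 1 := by simp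
    have hsent : k + ((b :: t).length : Int) = (k + 1) + (t.length : Int) := by
      rw [hlen]; ring
    simp only [List.foldl_cons, pvFalseIdx]
    cases b with
    | true =>
      have hstep : pvStep (best, cur) true = (max best (cur + 1), cur + 1) := by simp [pvStep]
      simp only [hstep, if_true]
      have hrec := ih (k + 1) prev (max best (cur + 1)) (cur + 1) (by omega) (by omega)
        (le_max_right _ _)
      rw [hsent, hrec]
      -- absorb the seed difference using the first gap ≥ cur + 1
      cases hF : pvFalseIdx t (k + 1) with
      | nil =>
        simp only [List.nil_append, pvGaps]
        have : cur + 1 ≤ (k + 1) + (t.length : Int) - prev - 1 := by omega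
        exact (pvFoldMax_absorb _ best (cur + 1) _ this).symm
      | cons x xs =>
        have hx : k + 1 ≤ x := pvFalseIdx_ge t (k + 1) x (by rw [hF]; exact List.mem_cons_self)
        simp only [List.cons_append, pvGaps]
        have : cur + 1 ≤ x - prev - 1 := by omega
        exact (pvFoldMax_absorb _ best (cur + 1) _ this).symm
    | false =>
      have hstep : pvStep (best, cur) false = (max best 0, 0) := by simp [pvStep]
      simp only [hstep]
      have hbest : max best 0 = best := by omega
      rw [hbest]
      simp only [Bool.false_eq_true, if_false, List.cons_append, pvGaps, List.foldl_cons]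
      have hmb : max best (k - prev - 1) = best := by omega
      rw [hmb, hsent]
      exact ih (k + 1) k best 0 (by omega) le_rfl (by omega)

theorem pvFalseIdx_map_pyRange (q : Int → Bool) : ∀ (n : Nat) (a b : Int), (b - a).toNat = n →
    pvFalseIdx ((PySem.List.pyRange a b 1).map q) a
      = (PySem.List.pyRange a b 1).filter (fun i => !q i) := by
  intro n
  induction n with
  | zero =>
    intro a b h
    rw [PySem.List.pyRange_one_eq_nil (by omega)]
    rfl
  | succ n ih =>
    intro a b h
    have hab : a < b := by omega
    rw [PySem.List.pyRange_one_cons hab, List.map_cons, List.filter_cons, pvFalseIdx]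
    cases hq : q a with
    | true =>
      simp only [if_true, Bool.not_true, Bool.false_eq_true, if_false]
      exact ih (a + 1) b (by omega)
    | false =>
      simp only [Bool.false_eq_true, if_false, Bool.not_false, if_true]
      rw [ih (a + 1) b (by omega)]

theorem pvZip_eq_gaps : ∀ (l : List Int) (x : Int),
    (((x :: l).zip l).map (fun ab => ab.2 - ab.1 - 1)) = pvGaps x l := by
  intro l
  induction l with
  | nil => intro x; rfl
  | cons y t ih =>
    intro x
    simp only [List.zip_cons_cons, List.map_cons, pvGaps, ih y]

theorem pvFoldMax_shift (l : List Int) : ∀ a b : Int,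
    List.foldl max (max a b) l = max a (List.foldl max b l) := by
  induction l with
  | nil => intro a b; rfl
  | cons x t ih =>
    intro a b
    simp only [List.foldl_cons, max_assoc]
    exact ih a (max b x)

theorem pvFoldMax_ge_init (l : List Int) : ∀ b : Int, b ≤ List.foldl max b l := by
  induction l with
  | nil => intro b; simp
  | cons x t ih => intro b; exact le_trans (le_max_left b x) (ih _)

theorem pvFoldMax_ge_mem (l : List Int) : ∀ (b g : Int), g ∈ l → g ≤ List.foldl max b l := by
  induction l with
  | nil => intro b g h; simp at h
  | cons x t ih =>
    intro b g h
    rcases List.mem_cons.mp h with h | h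
    · subst h; exact le_trans (le_max_right b g) (pvFoldMax_ge_init t _)
    · exact ih _ g h

theorem pvGaps_exists_nonneg (m : Int) : ∀ (F : List Int) (prev : Int), prev ≤ m - 1 →
    (∀ j ∈ F, j ≤ m - 1) → ∃ g ∈ pvGaps prev (F ++ [m]), 0 ≤ g := by
  intro F
  induction F with
  | nil =>
    intro prev hp _
    exact ⟨m - prev - 1, List.mem_cons_self, by omega⟩
  | cons j t ih =>
    intro prev hp hm
    rcases ih j (hm j List.mem_cons_self) (fun x hx => hm x (List.mem_cons_of_mem _ hx)) with
      ⟨g, hg, hg0⟩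
    exact ⟨g, List.mem_cons_of_mem _ hg, hg0⟩

-- ===== VERDICT (by name: the statement is the Claim_ definition above) =====
theorem check_seqential_at_least_spec : Claim_equal_check_seqential_at_least := by
  intro coded at_least _
  show check_seqential_at_least coded at_least = check_seqential_at_least_alt coded at_least
  cases coded with
  | nil =>
    show false = check_seqential_at_least_alt [] at_least
    rw [check_seqential_at_least_alt]
    rw [PySem.List.pyRange_one_eq_nil (by norm_num)]
    simp only [List.filter_nil, List.nil_append]
    simp only [List.length_nil, Nat.cast_zero, zero_sub]
    show false = decide ((-1 : Int) ≥ max (at_least - 1) 1)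
    symm; rw [decide_eq_false_iff_not]; omega
  | cons x0 t0 =>
    set xs := x0 :: t0 with hxs
    have hlenpos : 1 ≤ (xs.length : Int) := by simp [hxs]
    set m : Int := (xs.length : Int) - 1 with hm
    have hm0 : 0 ≤ m := by omega
    set bs : List Bool := (PySem.List.pyRange 0 m 1).map (pvPred xs) with hbs
    have hbslen : (bs.length : Int) = m := by
      rw [hbs, List.length_map, PySem.List.length_pyRange_one]; omega
    -- A side
    have hA : check_seqential_at_least xs at_least
        = decide ((bs.foldl pvStep (0, 0)).1 ≥ max (at_least - 1) 1) := by
      rw [check_seqential_at_least, pvGo_eq_boolLoop xs at_least xs.length 0 1 (by omega)]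
      have h1 := pvBoolLoop_eq_fold at_least bs 0 0 le_rfl (by omega)
      rw [zero_add] at h1
      rw [← hm, ← hbs]
      exact h1
    -- fold = gaps with seed 0
    have hGaps : (bs.foldl pvStep (0, 0)).1
        = (pvGaps (-1) (pvFalseIdx bs 0 ++ [m])).foldl max 0 := by
      have h := pvFold_eq_gaps bs 0 (-1) 0 0 (by omega) le_rfl le_rfl
      rw [hbslen] at h
      simpa using h
    -- B side
    rw [hA, hGaps, check_seqential_at_least_alt]
    rw [← hm]
    set F : List Int := (PySem.List.pyRange 0 m 1).filter
      (fun i => !(PySem.List.pyGetD xs i 0 + 1 == PySem.List.pyGetD xs (i + 1) 0)) with hF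
    have hFidx : pvFalseIdx bs 0 = F := by
      rw [hbs, hF]
      exact pvFalseIdx_map_pyRange (pvPred xs) (m - 0).toNat 0 m rfl
    have hzip : ((((-1) :: (F ++ [m])).zip (F ++ [m])).map (fun ab => ab.2 - ab.1 - 1))
        = pvGaps (-1) (F ++ [m]) := pvZip_eq_gaps (F ++ [m]) (-1)
    show decide _ = decide _
    rw [List.drop_one]
    show decide ((pvGaps (-1) (pvFalseIdx bs 0 ++ [m])).foldl max 0 ≥ max (at_least - 1) 1)
       = decide ((((((-1 : Int) :: (F ++ [m])).zip (((-1 : Int) :: (F ++ [m])).tail)).map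
           (fun ab => ab.2 - ab.1 - 1)).foldl max (-2)) ≥ max (at_least - 1) 1)
    rw [List.tail_cons, hzip, hFidx]
    -- seed -2 vs seed 0: the gaps list contains a nonnegative element
    have hmem : ∃ g ∈ pvGaps (-1) (F ++ [m]), 0 ≤ g := by
      apply pvGaps_exists_nonneg m F (-1) (by omega)
      intro j hj
      rw [← hFidx] at hj
      have := pvFalseIdx_lt bs 0 j hj
      omega
    rcases hmem with ⟨g, hg, hg0⟩
    have hge : 0 ≤ (pvGaps (-1) (F ++ [m])).foldl max (-2) :=
      le_trans hg0 (pvFoldMax_ge_mem _ _ _ hg)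
    have h02 : (0 : Int) = max 0 (-2) := by omega
    have : (pvGaps (-1) (F ++ [m])).foldl max 0
        = (pvGaps (-1) (F ++ [m])).foldl max (-2) := by
      rw [h02, pvFoldMax_shift]; omega
    rw [this]
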